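-- pv_equiv track=rewrite | github.com/MyLifeMyRulesMyCar/Marketing_Agent | trend_analyser/scripts/ai_enhancer.py | _parse_explanations
-- ===== SOURCE A (Python) =====
-- def _parse_explanations(raw: str) -> list[dict]:
--     items = []
--     current: dict = {}
--     for line in raw.splitlines():
--         line = line.strip()
--         if line.startswith("KEYWORD:"):
--             if current:
--                 items.append(current)
--             current = {"keyword": line[8:].strip()}
--         elif line.startswith("WHY:") and current:
--             current["explanation"] = line[4:].strip()
--     if current:
--         items.append(current)
--     return items
-- ===== SOURCE B (Python) =====
-- def _split_groups(lines):
--     # lines is empty or starts with a KEYWORD line; returns KEYWORD-started groups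
--     if not lines:
--         return []
--     body = []
--     rest = lines[1:]
--     while rest and not rest[0].startswith("KEYWORD:"):
--         body.append(rest[0])
--         rest = rest[1:]
--     return [[lines[0]] + body] + _split_groups(rest)
--
--
-- def _item(group):
--     d = {"keyword": group[0][8:].strip()}
--     whys = [ln[4:].strip() for ln in group[1:] if ln.startswith("WHY:")]
--     if whys:
--         d["explanation"] = whys[-1]
--     return d
--
--
-- def _parse_explanations(raw: str) -> list[dict]:
--     lines = [ln.strip() for ln in raw.splitlines()]
--     while lines and not lines[0].startswith("KEYWORD:"):
--         lines = lines[1:]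
--     return [_item(g) for g in _split_groups(lines)]
-- ===== Notes on version B (the rewrite author's own statement) =====
-- stated objective: alternative
-- what changed: B strips the lines, drops everything before the first KEYWORD line, partitions the rest into KEYWORD-started groups, and builds each dict from a group's first line and its last WHY line, replacing A's single stateful accumulator loop with mutable current-dict.
import Mathlib
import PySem

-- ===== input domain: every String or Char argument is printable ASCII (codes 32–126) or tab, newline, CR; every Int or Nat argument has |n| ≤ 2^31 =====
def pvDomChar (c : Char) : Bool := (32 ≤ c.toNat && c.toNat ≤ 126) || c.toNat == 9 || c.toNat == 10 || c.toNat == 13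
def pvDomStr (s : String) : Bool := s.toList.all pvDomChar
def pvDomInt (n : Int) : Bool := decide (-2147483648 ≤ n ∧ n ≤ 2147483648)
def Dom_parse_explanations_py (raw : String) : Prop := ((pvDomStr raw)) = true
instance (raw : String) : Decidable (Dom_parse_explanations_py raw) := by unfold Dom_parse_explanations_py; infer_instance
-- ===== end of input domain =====

-- B replaces A's stateful accumulator loop by grouping the stripped lines at KEYWORD lines; alternative decomposition, same cost.

-- ===== PORT A =====
-- loop body of A's for-loop, after 'line = line.strip()'
def pvBodyA (st : List (List (String × String)) × PySem.Dict String String) (line : String) :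
    List (List (String × String)) × PySem.Dict String String :=
  if PySem.Str.startswith line "KEYWORD:" then
    ((if st.2.items.isEmpty then st.1 else st.1 ++ [st.2.items]),
     PySem.Dict.mk [("keyword", PySem.Str.strip (PySem.Str.slice line (some 8) none))])
  else if PySem.Str.startswith line "WHY:" && !st.2.items.isEmpty then
    (st.1, PySem.Dict.insert st.2 "explanation" (PySem.Str.strip (PySem.Str.slice line (some 4) none)))
  else st

def parse_explanations_py (raw : String) : List (List (String × String)) :=
  let st := (PySem.Str.splitlines raw).foldl (fun st line => pvBodyA st (PySem.Str.strip line)) ([], PySem.Dict.mk [])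
  if st.2.items.isEmpty then st.1 else st.1 ++ [st.2.items]

-- ===== PORT B =====
def pvIsKw (l : String) : Bool := PySem.Str.startswith l "KEYWORD:"

def pvSplitGroups : List String → List (List String)
  | [] => []
  | h :: t =>
      (h :: t.takeWhile (fun l => !pvIsKw l)) :: pvSplitGroups (t.dropWhile (fun l => !pvIsKw l))
termination_by l => l.length
decreasing_by
  simp only [List.length_cons]
  exact Nat.lt_succ_of_le (List.length_dropWhile_le _ _)

def pvItem (g : List String) : List (String × String) :=
  match g with
  | [] => []
  | h :: body =>
      let d := [("keyword", PySem.Str.strip (PySem.Str.slice h (some 8) none))]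
      let whys := (body.filter (fun l => PySem.Str.startswith l "WHY:")).map
        (fun l => PySem.Str.strip (PySem.Str.slice l (some 4) none))
      match whys.getLast? with
      | some w => d ++ [("explanation", w)]
      | none => d

def parse_explanations_py_alt (raw : String) : List (List (String × String)) :=
  let lines := (PySem.Str.splitlines raw).map PySem.Str.strip
  (pvSplitGroups (lines.dropWhile (fun l => !pvIsKw l))).map pvItem

-- ===== PRECONDITION & SPEC =====
def Spec_parse_explanations_py (raw : String) (out : List (List (String × String))) : Prop := out = parse_explanations_py_alt raw
instance (raw : String) (out : List (List (String × String))) : Decidable (Spec_parse_explanations_py raw out) := by unfold Spec_parse_explanations_py; infer_instance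

-- ===== CLAIM (what is proved, stated in full; the proofs are below) =====
def Claim_equal_parse_explanations_py : Prop := ∀ (raw : String), Dom_parse_explanations_py raw → Spec_parse_explanations_py raw (parse_explanations_py raw)

-- ===== LEMMAS AND PROOFS =====

-- the "current" dict of A always has one of these two shapes
def pvCurOf (k : String) (e? : Option String) : List (String × String) :=
  match e? with
  | none => [("keyword", k)]
  | some e => [("keyword", k), ("explanation", e)]

def pvWhys (body : List String) : List String :=
  (body.filter (fun l => PySem.Str.startswith l "WHY:")).map
    (fun l => PySem.Str.strip (PySem.Str.slice l (some 4) none))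

def pvFin (st : List (List (String × String)) × PySem.Dict String String) : List (List (String × String)) :=
  if st.2.items.isEmpty then st.1 else st.1 ++ [st.2.items]

theorem pvItem_cons (h : String) (tw : List String) :
    pvItem (h :: tw) =
      pvCurOf (PySem.Str.strip (PySem.Str.slice h (some 8) none)) ((pvWhys tw).getLast?) := by
  simp only [pvItem, pvWhys, pvCurOf]
  cases ((tw.filter (fun l => PySem.Str.startswith l "WHY:")).map
      (fun l => PySem.Str.strip (PySem.Str.slice l (some 4) none))).getLast? <;> rfl

theorem pvGetLast?_cons {α : Type} (w : α) (ws : List α) :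
    (w :: ws).getLast? = ws.getLast?.or (some w) := by
  cases ws with
  | nil => rfl
  | cons b ws' => rw [List.getLast?_cons_cons]; cases h : (b :: ws').getLast? with
    | none => simp at h
    | some z => rfl

theorem pvInsert_curOf (k : String) (e? : Option String) (w : String) :
    PySem.Dict.insert (PySem.Dict.mk (pvCurOf k e?)) "explanation" w =
      PySem.Dict.mk (pvCurOf k (some w)) := by
  cases e? <;> simp [pvCurOf, PySem.Dict.insert, PySem.Dict.contains]

-- computation rules for A's loop body
theorem pvBodyA_kw (st : List (List (String × String)) × PySem.Dict String String) {h : String}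
    (hkw : PySem.Str.startswith h "KEYWORD:" = true) :
    pvBodyA st h = ((if st.2.items.isEmpty then st.1 else st.1 ++ [st.2.items]),
      PySem.Dict.mk [("keyword", PySem.Str.strip (PySem.Str.slice h (some 8) none))]) := by
  simp [PySem.Str.startswith_eq] at hkw
  simp [pvBodyA, hkw]

theorem pvBodyA_why (st : List (List (String × String)) × PySem.Dict String String) {h : String}
    (hkw : PySem.Str.startswith h "KEYWORD:" = false)
    (hwhy : PySem.Str.startswith h "WHY:" = true)
    (hne : st.2.items.isEmpty = false) :
    pvBodyA st h = (st.1, PySem.Dict.insert st.2 "explanation" (PySem.Str.strip (PySem.Str.slice h (some 4) none))) := by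
  simp [PySem.Str.startswith_eq] at hkw hwhy
  have hne' : st.2.items ≠ [] := by simpa using hne
  simp [pvBodyA, hkw, hwhy, hne']

theorem pvBodyA_skip1 (st : List (List (String × String)) × PySem.Dict String String) {h : String}
    (hkw : PySem.Str.startswith h "KEYWORD:" = false)
    (hwhy : PySem.Str.startswith h "WHY:" = false) :
    pvBodyA st h = st := by
  simp [PySem.Str.startswith_eq] at hkw hwhy
  simp [pvBodyA, hkw, hwhy]

theorem pvBodyA_skip2 (st : List (List (String × String)) × PySem.Dict String String) {h : String}
    (hkw : PySem.Str.startswith h "KEYWORD:" = false)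
    (hemp : st.2.items = []) :
    pvBodyA st h = st := by
  simp [PySem.Str.startswith_eq] at hkw
  simp [pvBodyA, hkw, hemp]

theorem pvCurOf_isEmpty (k : String) (e? : Option String) :
    (PySem.Dict.mk (pvCurOf k e?)).items.isEmpty = false := by
  cases e? <;> rfl

theorem pvRunGroup (ls : List String) : ∀ (items : List (List (String × String))) (k : String) (e? : Option String),
    pvFin (ls.foldl pvBodyA (items, PySem.Dict.mk (pvCurOf k e?))) =
      items ++ [pvCurOf k ((pvWhys (ls.takeWhile (fun l => !pvIsKw l))).getLast?.or e?)]
        ++ (pvSplitGroups (ls.dropWhile (fun l => !pvIsKw l))).map pvItem := by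
  induction ls with
  | nil =>
      intro items k e?
      cases e? <;> simp [pvFin, pvCurOf, pvWhys, pvSplitGroups, Option.or]
  | cons h t ih =>
      intro items k e?
      rw [List.foldl_cons]
      by_cases hkw : PySem.Str.startswith h "KEYWORD:" = true
      · have hkwc : PySem.Chars.startswith h.toList ['K','E','Y','W','O','R','D',':'] = true := by
          simpa using hkw
        rw [pvBodyA_kw _ hkw]
        have hne := pvCurOf_isEmpty k e?
        simp only [hne]
        rw [show (PySem.Dict.mk [("keyword", PySem.Str.strip (PySem.Str.slice h (some 8) none))]) =
          PySem.Dict.mk (pvCurOf (PySem.Str.strip (PySem.Str.slice h (some 8) none)) none) from rfl, ih]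
        have htk : List.takeWhile (fun l => !pvIsKw l) (h :: t) = [] := by
          simp [pvIsKw, hkwc]
        have hdw : List.dropWhile (fun l => !pvIsKw l) (h :: t) = h :: t := by
          simp [pvIsKw, hkwc]
        rw [htk, hdw, pvSplitGroups, List.map_cons, pvItem_cons]
        cases (pvWhys (List.takeWhile (fun l => !pvIsKw l) t)).getLast? <;>
          simp [pvWhys, Option.or, List.append_assoc]
      · have hkw' : PySem.Str.startswith h "KEYWORD:" = false := by simpa using hkw
        have hkwc : PySem.Chars.startswith h.toList ['K','E','Y','W','O','R','D',':'] = false := by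
          simpa using hkw'
        have htk : List.takeWhile (fun l => !pvIsKw l) (h :: t) =
            h :: List.takeWhile (fun l => !pvIsKw l) t := by
          simp [pvIsKw, hkwc]
        have hdw : List.dropWhile (fun l => !pvIsKw l) (h :: t) =
            List.dropWhile (fun l => !pvIsKw l) t := by
          simp [pvIsKw, hkwc]
        by_cases hwhy : PySem.Str.startswith h "WHY:" = true
        · have hwhyc : PySem.Chars.startswith h.toList ['W','H','Y',':'] = true := by
            simpa using hwhy
          rw [pvBodyA_why _ hkw' hwhy (pvCurOf_isEmpty k e?)]
          have hins := pvInsert_curOf k e? (PySem.Str.strip (PySem.Str.slice h (some 4) none))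
          simp only [] at hins ⊢
          rw [hins, ih, htk, hdw]
          have hwh : pvWhys (h :: List.takeWhile (fun l => !pvIsKw l) t) =
              PySem.Str.strip (PySem.Str.slice h (some 4) none) :: pvWhys (List.takeWhile (fun l => !pvIsKw l) t) := by
            simp [pvWhys, hwhyc]
          rw [hwh, pvGetLast?_cons]
          cases (pvWhys (List.takeWhile (fun l => !pvIsKw l) t)).getLast? <;> rfl
        · have hwhy' : PySem.Str.startswith h "WHY:" = false := by simpa using hwhy
          have hwhyc : PySem.Chars.startswith h.toList ['W','H','Y',':'] = false := by
            simpa using hwhy'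
          rw [pvBodyA_skip1 _ hkw' hwhy', ih, htk, hdw]
          have hwh : pvWhys (h :: List.takeWhile (fun l => !pvIsKw l) t) =
              pvWhys (List.takeWhile (fun l => !pvIsKw l) t) := by
            simp [pvWhys, hwhyc]
          rw [hwh]

theorem pvKey (ls : List String) : ∀ (items : List (List (String × String))),
    pvFin (ls.foldl pvBodyA (items, PySem.Dict.mk [])) =
      items ++ (pvSplitGroups (ls.dropWhile (fun l => !pvIsKw l))).map pvItem := by
  induction ls with
  | nil => intro items; simp [pvFin, pvSplitGroups]
  | cons h t ih =>
      intro items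
      rw [List.foldl_cons]
      by_cases hkw : PySem.Str.startswith h "KEYWORD:" = true
      · have hkwc : PySem.Chars.startswith h.toList ['K','E','Y','W','O','R','D',':'] = true := by
          simpa using hkw
        rw [pvBodyA_kw _ hkw]
        simp only [List.isEmpty_nil]
        rw [show (PySem.Dict.mk [("keyword", PySem.Str.strip (PySem.Str.slice h (some 8) none))]) =
          PySem.Dict.mk (pvCurOf (PySem.Str.strip (PySem.Str.slice h (some 8) none)) none) from rfl,
          pvRunGroup]
        have hdw : List.dropWhile (fun l => !pvIsKw l) (h :: t) = h :: t := by
          simp [pvIsKw, hkwc]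
        rw [hdw, pvSplitGroups, List.map_cons, pvItem_cons]
        cases (pvWhys (List.takeWhile (fun l => !pvIsKw l) t)).getLast? <;>
          simp [Option.or, List.append_assoc]
      · have hkw' : PySem.Str.startswith h "KEYWORD:" = false := by simpa using hkw
        have hkwc : PySem.Chars.startswith h.toList ['K','E','Y','W','O','R','D',':'] = false := by
          simpa using hkw'
        rw [pvBodyA_skip2 _ hkw' rfl, ih]
        have hdw : List.dropWhile (fun l => !pvIsKw l) (h :: t) =
            List.dropWhile (fun l => !pvIsKw l) t := by
          simp [pvIsKw, hkwc]
        rw [hdw]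

-- ===== VERDICT (by name: the statement is the Claim_ definition above) =====
theorem parse_explanations_py_spec : Claim_equal_parse_explanations_py := by
  intro raw _
  unfold Spec_parse_explanations_py parse_explanations_py parse_explanations_py_alt
  rw [show ((PySem.Str.splitlines raw).foldl (fun st line => pvBodyA st (PySem.Str.strip line)) ([], PySem.Dict.mk [])) =
    (((PySem.Str.splitlines raw).map PySem.Str.strip).foldl pvBodyA ([], PySem.Dict.mk [])) from
    List.foldl_map.symm]
  exact pvKey _ []
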